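-- pv_equiv track=rewrite | github.com/Jean-Massumi/Estruturas_de_Dados_UEM | recursividade/exer11.py | maior_str
-- ===== SOURCE A (Python) =====
-- def maior_str(lst: list[str], qtd: int):
--     '''
--     Devolve o maior tamanho de uma string de uma lista strings
--
--     Exemplos
--     >>> maior_str(['casa', 'celular', 'ceu', 'mouse'], 4)
--     7
--     >>> maior_str(['computador', 'celular', 'ceu', 'mouse'], 4)
--     10
--     >>> maior_str(['casa', 'celular', 'ceu', 'ventilador'], 4)
--     10
--     >>> maior_str(['casa', 'celular', 'paralelepipedo', 'mouse'], 4)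
--     14
--     '''
--
--     if qtd == 1:
--         return len(lst[0])
--     else:
--         maior = maior_str(lst, qtd - 1)
--         if len(lst[qtd - 1]) > maior:
--             maior = len(lst[qtd - 1])
--
--     return maior
-- ===== SOURCE B (Python) =====
-- def maior_str(lst: list[str], qtd: int):
--     maior = len(lst[0])
--     for i in range(1, qtd):
--         l = len(lst[i])
--         if l > maior:
--             maior = l
--     return maior
-- ===== Notes on version B (the rewrite author's own statement) =====
-- stated objective: simpler
-- what changed: Replaced the linear recursion (which recurses from qtd down to 1 and compares on the way back) by a single iterative forward loop over range(1, qtd) with a running maximum.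
import Mathlib
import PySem

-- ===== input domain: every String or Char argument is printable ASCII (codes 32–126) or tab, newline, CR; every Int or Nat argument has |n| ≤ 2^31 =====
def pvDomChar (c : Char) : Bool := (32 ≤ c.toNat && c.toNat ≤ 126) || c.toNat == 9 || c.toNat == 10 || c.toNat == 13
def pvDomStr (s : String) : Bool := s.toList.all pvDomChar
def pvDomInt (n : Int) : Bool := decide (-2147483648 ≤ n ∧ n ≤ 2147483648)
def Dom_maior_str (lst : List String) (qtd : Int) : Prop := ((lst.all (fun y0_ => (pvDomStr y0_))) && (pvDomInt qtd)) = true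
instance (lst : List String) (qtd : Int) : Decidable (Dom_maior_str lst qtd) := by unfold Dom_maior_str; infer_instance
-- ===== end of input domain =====

-- B replaces A's linear recursion by a single iterative forward loop with a running maximum (simpler, O(1) space).


-- ===== PORT A =====
-- A recurses on qtd; here the recursion runs on qtd.toNat (Pre_ guarantees qtd ≥ 1, where this agrees
-- with Python). lst[k] is ported as pyGetD lst k "" — exact on Pre_, where every index is in range.
def maiorARec (lst : List String) : Nat → Int
  | 0 => 0   -- unreachable under Pre_ (Python recurses forever for qtd ≤ 0)
  | 1 => PySem.Str.len (PySem.List.pyGetD lst 0 "")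
  | n + 2 =>
      let maior := maiorARec lst (n + 1)
      let l := PySem.Str.len (PySem.List.pyGetD lst ((n : Int) + 1) "")
      if l > maior then l else maior

def maior_str (lst : List String) (qtd : Int) : Int := maiorARec lst qtd.toNat

-- ===== PORT B =====
def maior_str_alt (lst : List String) (qtd : Int) : Int :=
  (PySem.List.pyRange 1 qtd 1).foldl
    (fun maior i =>
      let l := PySem.Str.len (PySem.List.pyGetD lst i "")
      if l > maior then l else maior)
    (PySem.Str.len (PySem.List.pyGetD lst 0 ""))

-- ===== PRECONDITION & SPEC =====
-- Python A raises for qtd ≤ 0 (RecursionError) and for qtd > len(lst) (IndexError); Pre_ excludes exactly those.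
def Pre_maior_str (lst : List String) (qtd : Int) : Prop := 1 ≤ qtd ∧ qtd ≤ lst.length
instance (lst : List String) (qtd : Int) : Decidable (Pre_maior_str lst qtd) := by unfold Pre_maior_str; infer_instance
def pvWitness_maior_str : List String × Int := (["casa", "celular", "ceu", "mouse"], 4)

def Spec_maior_str (lst : List String) (qtd : Int) (out : Int) : Prop := out = maior_str_alt lst qtd
instance (lst : List String) (qtd : Int) (out : Int) : Decidable (Spec_maior_str lst qtd out) := by unfold Spec_maior_str; infer_instance

-- ===== CLAIM (what is proved, stated in full; the proofs are below) =====
def Claim_equal_maior_str : Prop := ∀ (lst : List String) (qtd : Int), Dom_maior_str lst qtd → Pre_maior_str lst qtd → Spec_maior_str lst qtd (maior_str lst qtd)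

-- ===== LEMMAS AND PROOFS =====
lemma maiorARec_eq_foldl (lst : List String) (n : Nat) :
    maiorARec lst (n + 1) =
      (PySem.List.pyRange 1 ((n : Int) + 1) 1).foldl
        (fun maior i =>
          let l := PySem.Str.len (PySem.List.pyGetD lst i "")
          if l > maior then l else maior)
        (PySem.Str.len (PySem.List.pyGetD lst 0 "")) := by
  induction n with
  | zero => simp [maiorARec, PySem.List.pyRange_one_eq_nil]
  | succ n ih =>
      have hsplit : PySem.List.pyRange 1 ((n : Int) + 1 + 1) 1
          = PySem.List.pyRange 1 ((n : Int) + 1) 1 ++ [(n : Int) + 1] :=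
        PySem.List.pyRange_one_succ_right (by omega)
      show maiorARec lst (n + 2) = _
      rw [maiorARec]
      push_cast
      rw [hsplit, List.foldl_append, ← ih]
      simp

theorem maior_str_spec : Claim_equal_maior_str := by
  intro lst qtd _ hpre
  obtain ⟨h1, _⟩ := hpre
  unfold Spec_maior_str maior_str maior_str_alt
  obtain ⟨n, rfl⟩ : ∃ n : Nat, qtd = (n : Int) + 1 :=
    ⟨(qtd - 1).toNat, by omega⟩
  rw [show (((n : Int) + 1).toNat) = n + 1 by omega]
  exact maiorARec_eq_foldl lst n
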